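-- pv_equiv track=rewrite | github.com/pypi-data/pypi-mirror-41 | packages/mhelper/mhelper-1.0.1.69.tar.gz/mhelper-1.0.1.69/mhelper/array_helper.py | iter_distance_range
-- ===== SOURCE A (Python) =====
-- from typing import List, Optional, Iterator, Tuple, Dict, Iterable, Union, TypeVar, Callable
--
-- def iter_distance_range( min: int, max_: int, start: int ) -> Iterator[int]:
--     yield start
--     i = 1
--     while True:
--         if (start - i) >= min:
--             yield start - i
--
--         if (start + i) < max_:
--             yield start + i
--
--         if (start - i) < min and (start + i) >= max_:
--             return
--
--         i += 1
-- ===== SOURCE B (Python) =====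
-- def iter_distance_range(min, max_, start):
--     yield start
--     candidates = list(range(min, start)) + list(range(start + 1, max_))
--     candidates.sort(key=lambda v: 2 * abs(v - start) + (v > start))
--     yield from candidates
-- ===== Notes on version B (the rewrite author's own statement) =====
-- stated objective: alternative
-- what changed: Replaces A's unbounded counter loop with per-step range tests by a collect-then-sort algorithm: build the list of all in-range values once and stable-sort it by an encoded (distance, lower-arm-first) key.
import Mathlib
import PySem

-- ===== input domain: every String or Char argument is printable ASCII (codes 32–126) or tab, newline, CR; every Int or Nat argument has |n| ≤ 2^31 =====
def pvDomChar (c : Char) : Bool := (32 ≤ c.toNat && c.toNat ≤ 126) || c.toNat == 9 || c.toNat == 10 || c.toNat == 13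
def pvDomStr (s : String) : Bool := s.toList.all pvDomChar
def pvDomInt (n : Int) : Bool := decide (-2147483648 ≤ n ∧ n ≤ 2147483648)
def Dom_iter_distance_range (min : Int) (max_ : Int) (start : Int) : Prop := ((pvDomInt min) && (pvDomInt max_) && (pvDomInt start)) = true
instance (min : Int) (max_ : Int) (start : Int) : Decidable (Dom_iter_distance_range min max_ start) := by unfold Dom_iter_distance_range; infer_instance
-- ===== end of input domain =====

-- B replaces A's unbounded counter loop having per-step range tests by collect-then-sort: build the in-range values once and stable-sort them by an encoded (distance, lower-first) key; same values in the same order.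

-- ===== PORT A =====
-- the while-True loop of A: at counter i, emit start-i (if ≥ min) then start+i (if < max_); stop when both arms are out of range.
-- The Nat fuel only makes the recursion structural; iter_distance_range passes enough fuel that it is never exhausted.
def iter_distance_range_go (min : Int) (max_ : Int) (start : Int) (i : Int) : Nat → List Int
  | 0 => []
  | fuel + 1 =>
    if start - i < min ∧ max_ ≤ start + i then
      (if min ≤ start - i then [start - i] else []) ++
        (if start + i < max_ then [start + i] else [])
    else
      ((if min ≤ start - i then [start - i] else []) ++
        (if start + i < max_ then [start + i] else [])) ++
        iter_distance_range_go min max_ start (i + 1) fuel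

def iter_distance_range (min : Int) (max_ : Int) (start : Int) : List Int :=
  start :: iter_distance_range_go min max_ start 1 ((max (start - min + 1) (max_ - start)).toNat + 1)

-- ===== PORT B =====
-- B: candidates = list(range(min, start)) + list(range(start+1, max_));
--    candidates.sort(key=lambda v: 2*abs(v-start) + (v > start)); yield start, then the sorted candidates.
--    Python's bool-as-int '(v > start)' is ported as 'if start < v then 1 else 0' (exact).
def iter_distance_range_alt (min : Int) (max_ : Int) (start : Int) : List Int :=
  let candidates := PySem.List.pyRange min start 1 ++ PySem.List.pyRange (start + 1) max_ 1
  start :: PySem.List.sorted candidates (fun v => 2 * |v - start| + (if start < v then 1 else 0))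

-- ===== PRECONDITION & SPEC =====
def Spec_iter_distance_range (min : Int) (max_ : Int) (start : Int) (out : List Int) : Prop := out = iter_distance_range_alt min max_ start
instance (min : Int) (max_ : Int) (start : Int) (out : List Int) : Decidable (Spec_iter_distance_range min max_ start out) := by unfold Spec_iter_distance_range; infer_instance

-- ===== CLAIM (what is proved, stated in full; the proofs are below) =====
def Claim_equal_iter_distance_range : Prop := ∀ (min : Int) (max_ : Int) (start : Int), Dom_iter_distance_range min max_ start → Spec_iter_distance_range min max_ start (iter_distance_range min max_ start)

-- ===== LEMMAS AND PROOFS =====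

lemma abs_down (start i : Int) (hi : 0 ≤ i) : |start - i - start| = i := by
  rw [show start - i - start = -i by ring, abs_neg, abs_of_nonneg hi]

lemma abs_up (start i : Int) (hi : 0 ≤ i) : |start + i - start| = i := by
  rw [show start + i - start = i by ring, abs_of_nonneg hi]

-- an element the loop body emits at counter i is start-i or start+i
lemma mem_emit {min max_ start i x : Int}
    (hx : x ∈ (if min ≤ start - i then [start - i] else []) ++
        (if start + i < max_ then [start + i] else [])) :
    x = start - i ∨ x = start + i := by
  rcases List.mem_append.mp hx with h | h
  · left; split at h <;> simp_all
  · right; split at h <;> simp_all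

-- every element emitted by A's loop at counter i is at distance ≥ i from start
lemma mem_go_dist (min max_ start : Int) (fuel : Nat) :
    ∀ i : Int, 1 ≤ i → ∀ x ∈ iter_distance_range_go min max_ start i fuel, i ≤ |x - start| := by
  induction fuel with
  | zero => intro i _ x hx; simp [iter_distance_range_go] at hx
  | succ fuel ih =>
    intro i hi x hx
    rw [iter_distance_range_go] at hx
    split at hx
    · rcases mem_emit hx with rfl | rfl
      · have := abs_down start i (by omega); omega
      · have := abs_up start i (by omega); omega
    · rcases List.mem_append.mp hx with hx | hx
      · rcases mem_emit hx with rfl | rfl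
        · have := abs_down start i (by omega); omega
        · have := abs_up start i (by omega); omega
      · have := ih (i + 1) (by omega) x hx; omega

-- A's loop output has strictly increasing keys (distance, then lower arm before upper arm)
lemma go_pairwise (min max_ start : Int) (fuel : Nat) :
    ∀ i : Int, 1 ≤ i →
    (iter_distance_range_go min max_ start i fuel).Pairwise
      (fun a b => 2 * |a - start| + (if start < a then 1 else 0)
                < 2 * |b - start| + (if start < b then 1 else 0)) := by
  induction fuel with
  | zero => intro i _; simp [iter_distance_range_go]
  | succ fuel ih =>
    intro i hi
    rw [iter_distance_range_go]
    have hemit : ((if min ≤ start - i then [start - i] else []) ++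
        (if start + i < max_ then [start + i] else []) : List Int).Pairwise
        (fun a b => 2 * |a - start| + (if start < a then 1 else 0)
                  < 2 * |b - start| + (if start < b then 1 else 0)) := by
      by_cases hd : min ≤ start - i <;> by_cases hu : start + i < max_
      · rw [if_pos hd, if_pos hu]
        refine List.pairwise_append.mpr ⟨by simp, by simp, ?_⟩
        intro a ha b hb
        simp only [List.mem_singleton] at ha hb
        subst ha; subst hb
        have h1 := abs_down start i (by omega)
        have h2 := abs_up start i (by omega)
        rw [if_neg (show ¬ start < start - i by omega),
          if_pos (show start < start + i by omega)]
        omega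
      · rw [if_pos hd, if_neg hu]; simp
      · rw [if_neg hd, if_pos hu]; simp
      · rw [if_neg hd, if_neg hu]; simp
    split
    · exact hemit
    · refine List.pairwise_append.mpr ⟨hemit, ih (i + 1) (by omega), ?_⟩
      intro a ha b hb
      have hbd := mem_go_dist min max_ start fuel (i + 1) (by omega) b hb
      rcases mem_emit ha with rfl | rfl
      · have h1 := abs_down start i (by omega)
        rw [if_neg (show ¬ start < start - i by omega)]
        split <;> omega
      · have h2 := abs_up start i (by omega)
        rw [if_pos (show start < start + i by omega)]
        split <;> omega

-- A's loop output at counter i is a permutation of the remaining candidate values (given enough fuel)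
lemma go_perm (min max_ start : Int) (fuel : Nat) :
    ∀ i : Int, 1 ≤ i → max (start - min + 1) (max_ - start) < i + (fuel : Int) →
    (iter_distance_range_go min max_ start i fuel).Perm
      (PySem.List.pyRange min (start - i + 1) 1 ++ PySem.List.pyRange (start + i) max_ 1) := by
  induction fuel with
  | zero =>
    intro i hi hf
    rw [show ((0 : Nat) : Int) = 0 by simp] at hf
    rw [iter_distance_range_go,
      PySem.List.pyRange_one_eq_nil (show start - i + 1 ≤ min by omega),
      PySem.List.pyRange_one_eq_nil (show max_ ≤ start + i by omega)]
    simp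
  | succ fuel ih =>
    intro i hi hf
    rw [iter_distance_range_go]
    split
    · next hstop =>
      rw [if_neg (show ¬ min ≤ start - i by omega),
        if_neg (show ¬ start + i < max_ by omega),
        PySem.List.pyRange_one_eq_nil (show start - i + 1 ≤ min by omega),
        PySem.List.pyRange_one_eq_nil (show max_ ≤ start + i by omega)]
    · next hgo =>
      have hperm := ih (i + 1) (by omega) (by push_cast at hf ⊢; omega)
      rw [show start - (i + 1) + 1 = start - i by ring,
        show start + (i + 1) = start + i + 1 by ring] at hperm
      by_cases hd : min ≤ start - i <;> by_cases hu : start + i < max_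
      · rw [if_pos hd, if_pos hu,
          PySem.List.pyRange_one_append min (start - i) (start - i + 1) (by omega) (by omega),
          PySem.List.pyRange_one_singleton,
          PySem.List.pyRange_one_cons (show start + i < max_ from hu)]
        have h1 : ([start - i] ++ ([start + i] ++ iter_distance_range_go min max_ start (i + 1) fuel)).Perm
            ([start - i] ++ ([start + i] ++
              (PySem.List.pyRange min (start - i) 1 ++ PySem.List.pyRange (start + i + 1) max_ 1))) :=
          (hperm.append_left [start + i]).append_left [start - i]
        refine h1.trans ?_
        simp only [List.append_assoc, List.cons_append]
        simpa using List.perm_append_comm_assoc [start - i, start + i]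
          (PySem.List.pyRange min (start - i) 1) (PySem.List.pyRange (start + i + 1) max_ 1)
      · rw [if_pos hd, if_neg hu]
        have hL : (iter_distance_range_go min max_ start (i + 1) fuel).Perm
            (PySem.List.pyRange min (start - i) 1) := by
          rw [PySem.List.pyRange_one_eq_nil (show max_ ≤ start + i + 1 by omega)] at hperm
          simpa using hperm
        rw [PySem.List.pyRange_one_eq_nil (show max_ ≤ start + i by omega),
          PySem.List.pyRange_one_append min (start - i) (start - i + 1) (by omega) (by omega),
          PySem.List.pyRange_one_singleton]
        simp only [List.append_nil]
        exact (hL.append_left [start - i]).trans List.perm_append_comm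
      · rw [if_neg hd, if_pos hu]
        have hL : (iter_distance_range_go min max_ start (i + 1) fuel).Perm
            (PySem.List.pyRange (start + i + 1) max_ 1) := by
          rw [PySem.List.pyRange_one_eq_nil (show start - i ≤ min by omega)] at hperm
          simpa using hperm
        rw [PySem.List.pyRange_one_eq_nil (show start - i + 1 ≤ min by omega),
          PySem.List.pyRange_one_cons (show start + i < max_ from hu)]
        simp only [List.nil_append, List.cons_append]
        exact hL.cons _
      · exact absurd ⟨by omega, by omega⟩ hgo

-- ===== VERDICT (by name: the statement is the Claim_ definition above) =====
theorem iter_distance_range_spec : Claim_equal_iter_distance_range := by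
  intro min max_ start _
  unfold Spec_iter_distance_range iter_distance_range iter_distance_range_alt
  have h := go_perm min max_ start ((max (start - min + 1) (max_ - start)).toNat + 1) 1 (by omega)
    (by push_cast; omega)
  rw [show start - 1 + 1 = start by ring] at h
  exact congrArg (start :: ·)
    (PySem.List.sorted_eq_of_perm_of_pairwise_lt _ _ _ h
      (go_pairwise min max_ start _ 1 (by omega))).symm
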